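-- pv_equiv track=rewrite | github.com/polarbear333/heuristic-tetris-DQN | ai_training/rl_agent/environment/features.py | calculate_hole_depth
-- ===== SOURCE A (Python) =====
-- def calculate_hole_depth(board, width, height):
--         max_depth = 0
--         for x in range(width):
--             depth = 0
--             block_found = False
--             for y in range(height):
--                 if block_found and board[y][x] == (0, 0, 0):
--                     depth +=1
--                 if board[y][x] != (0, 0, 0):
--                     block_found = True
--                 max_depth = max(max_depth, depth)
--         return max_depth
-- ===== SOURCE B (Python) =====
-- def calculate_hole_depth(board, width, height):
--     # Two-phase per column: locate the topmost non-empty cell, then count the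
--     # empty cells strictly below it; answer is the max over the columns.
--     empty = (0, 0, 0)
--     best = 0
--     for x in range(width):
--         col = [board[y][x] for y in range(height)]
--         top = next((i for i, c in enumerate(col) if c != empty), None)
--         if top is not None:
--             holes = sum(1 for c in col[top + 1:] if c == empty)
--             best = max(best, holes)
--     return best
-- ===== Notes on version B (the rewrite author's own statement) =====
-- stated objective: simpler
-- what changed: Replaces A's flag-carrying single pass with a running max over every prefix by a two-phase pass per column: locate the topmost non-empty cell, then count the empty cells below it, taking the max once per column.
import Mathlib
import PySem

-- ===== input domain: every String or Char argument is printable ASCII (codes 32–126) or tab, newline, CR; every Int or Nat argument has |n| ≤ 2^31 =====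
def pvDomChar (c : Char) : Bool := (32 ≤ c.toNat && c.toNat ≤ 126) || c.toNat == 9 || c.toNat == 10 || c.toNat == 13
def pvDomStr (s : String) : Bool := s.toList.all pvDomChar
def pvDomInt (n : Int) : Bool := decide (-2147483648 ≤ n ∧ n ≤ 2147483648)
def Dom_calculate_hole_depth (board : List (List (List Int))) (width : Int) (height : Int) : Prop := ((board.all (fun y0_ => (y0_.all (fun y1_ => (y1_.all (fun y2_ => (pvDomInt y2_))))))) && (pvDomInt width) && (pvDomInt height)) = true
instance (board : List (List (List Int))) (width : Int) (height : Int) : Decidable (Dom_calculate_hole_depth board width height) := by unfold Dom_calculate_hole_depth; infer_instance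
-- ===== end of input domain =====

-- B replaces A's flag-carrying single pass (running max over every prefix depth) by a
-- two-phase locate-then-count pass per column; same return value, no mutation.

-- ===== PORT A =====
-- board[y][x]; the [] default of pyGetD is never reached inside Pre_ (indices in range there).
def calculate_hole_depth (board : List (List (List Int))) (width : Int) (height : Int) : Int :=
  (PySem.List.pyRange 0 width 1).foldl (fun max_depth x =>
    ((PySem.List.pyRange 0 height 1).foldl (fun (st : Int × Bool × Int) y =>
        let cell := PySem.List.pyGetD (PySem.List.pyGetD board y []) x []
        let depth := if st.2.1 && (cell == [0, 0, 0]) then st.1 + 1 else st.1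
        let block_found := if cell != [0, 0, 0] then true else st.2.1
        (depth, block_found, max st.2.2 depth))
      (0, false, max_depth)).2.2) 0

-- ===== PORT B =====
-- board[y][x]; the [] default of pyGetD is never reached inside Pre_ (indices in range there).
def pvColCell (board : List (List (List Int))) (x y : Int) : List Int :=
  PySem.List.pyGetD (PySem.List.pyGetD board y []) x []

-- next((i for i, c in enumerate(col) if c != empty), None)
def pvFindTop : List (List Int) → Option Nat
  | [] => none
  | c :: rest => if c ≠ [0, 0, 0] then some 0 else (pvFindTop rest).map (· + 1)

def calculate_hole_depth_alt (board : List (List (List Int))) (width : Int) (height : Int) : Int :=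
  (PySem.List.pyRange 0 width 1).foldl (fun best x =>
    let col := (PySem.List.pyRange 0 height 1).map (fun y => pvColCell board x y)
    match pvFindTop col with
    | none => best
    -- col[top+1:] with top+1 ≥ 0 is exactly drop (top+1); sum(1 for …) is countP
    | some t => max best ((col.drop (t + 1)).countP (fun c => c == [0, 0, 0]) : Int)) 0

-- ===== PRECONDITION & SPEC =====
-- Pre_ excludes exactly the inputs where A's board[y][x] raises IndexError.
def Pre_calculate_hole_depth (board : List (List (List Int))) (width : Int) (height : Int) : Prop :=
  width ≤ 0 ∨ height ≤ 0 ∨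
    (height ≤ (board.length : Int) ∧ ∀ row ∈ board.take height.toNat, width ≤ (row.length : Int))
instance (board : List (List (List Int))) (width : Int) (height : Int) : Decidable (Pre_calculate_hole_depth board width height) := by unfold Pre_calculate_hole_depth; infer_instance
def pvWitness_calculate_hole_depth : List (List (List Int)) × Int × Int := ([[[1, 2, 3]], [[0, 0, 0]]], 1, 2)

def Spec_calculate_hole_depth (board : List (List (List Int))) (width : Int) (height : Int) (out : Int) : Prop := out = calculate_hole_depth_alt board width height
instance (board : List (List (List Int))) (width : Int) (height : Int) (out : Int) : Decidable (Spec_calculate_hole_depth board width height out) := by unfold Spec_calculate_hole_depth; infer_instance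

-- ===== CLAIM (what is proved, stated in full; the proofs are below) =====
def Claim_equal_calculate_hole_depth : Prop := ∀ (board : List (List (List Int))) (width : Int) (height : Int), Dom_calculate_hole_depth board width height → Pre_calculate_hole_depth board width height → Spec_calculate_hole_depth board width height (calculate_hole_depth board width height)

-- ===== LEMMAS AND PROOFS =====

-- A's inner loop body, on the cell value (lets of the port, zeta-expanded)
def pvStepA (st : Int × Bool × Int) (c : List Int) : Int × Bool × Int :=
  (if st.2.1 && (c == [0, 0, 0]) then st.1 + 1 else st.1,
   if c != [0, 0, 0] then true else st.2.1,
   max st.2.2 (if st.2.1 && (c == [0, 0, 0]) then st.1 + 1 else st.1))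

-- B's per-column value
def pvHole (col : List (List Int)) : Int :=
  match pvFindTop col with
  | none => 0
  | some t => ((col.drop (t + 1)).countP (fun c => c == [0, 0, 0]) : Int)

-- a fold whose body reads g y is a fold over the mapped list
theorem foldl_body_map {α β γ : Type} (g : α → β) (f : γ → β → γ) :
    ∀ (l : List α) (st : γ), l.foldl (fun st y => f st (g y)) st = (l.map g).foldl f st := by
  intro l
  induction l with
  | nil => intro st; rfl
  | cons y ys ih => intro st; simpa using ih (f st (g y))

-- once the block flag is set, A just counts empty cells and keeps the running max
theorem pvStepA_run_true (col : List (List Int)) :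
    ∀ (d md : Int), d ≤ md →
      col.foldl pvStepA (d, true, md)
        = (d + (col.countP (fun c => c == [0, 0, 0]) : Int), true,
           max md (d + (col.countP (fun c => c == [0, 0, 0]) : Int))) := by
  induction col with
  | nil =>
      intro d md hdm
      simp only [List.foldl_nil, List.countP_nil]
      rw [Nat.cast_zero, add_zero, max_eq_left hdm]
  | cons c rest ih =>
      intro d md hdm
      rw [List.foldl_cons]
      by_cases hc : c = [0, 0, 0]
      · rw [show pvStepA (d, true, md) c = (d + 1, true, max md (d + 1)) by simp [pvStepA, hc]]
        rw [ih (d + 1) (max md (d + 1)) (le_max_right _ _), List.countP_cons]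
        rw [if_pos (by simp [hc])]
        simp only [Prod.mk.injEq]
        refine ⟨by push_cast; ring, by trivial, by push_cast; omega⟩
      · rw [show pvStepA (d, true, md) c = (d, true, max md d) by simp [pvStepA, hc]]
        rw [ih d (max md d) (le_max_right _ _), List.countP_cons]
        rw [if_neg (by simpa using hc)]
        simp only [Prod.mk.injEq, Nat.add_zero]
        exact ⟨by trivial, by trivial, by omega⟩

-- A's inner loop over a column equals  max md (pvHole col)  (for md ≥ 0)
theorem pvStepA_run (col : List (List Int)) :
    ∀ (md : Int), 0 ≤ md → (col.foldl pvStepA (0, false, md)).2.2 = max md (pvHole col) := by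
  induction col with
  | nil => intro md h; simp [pvHole, pvFindTop]; omega
  | cons c rest ih =>
      intro md h
      rw [List.foldl_cons]
      by_cases hc : c = [0, 0, 0]
      · have : pvStepA (0, false, md) c = (0, false, max md 0) := by
          simp [pvStepA, hc]
        rw [this, max_eq_left h, ih md h]
        have : pvHole (c :: rest) = pvHole rest := by
          unfold pvHole
          simp only [pvFindTop, hc]
          cases ht : pvFindTop rest with
          | none => simp
          | some t => simp [List.drop_succ_cons]
        rw [this]
      · have : pvStepA (0, false, md) c = (0, true, max md 0) := by
          simp [pvStepA, hc]
        rw [this, max_eq_left h]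
        rw [pvStepA_run_true rest 0 md h]
        have : pvHole (c :: rest) = (rest.countP (fun c => c == [0, 0, 0]) : Int) := by
          unfold pvHole
          simp [pvFindTop, hc]
        rw [this]
        simp

-- B's per-column step written through pvHole (for best ≥ 0)
theorem B_step_eq (col : List (List Int)) (best : Int) (h : 0 ≤ best) :
    (match pvFindTop col with
     | none => best
     | some t => max best ((col.drop (t + 1)).countP (fun c => c == [0, 0, 0]) : Int))
      = max best (pvHole col) := by
  unfold pvHole
  cases ht : pvFindTop col with
  | none => simp; omega
  | some t => simp

-- equal steps (on nonnegative accumulators, B-monotone) give equal folds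
theorem foldl_congr_nonneg (fA fB : Int → Int → Int)
    (hB : ∀ (a x : Int), a ≤ fB a x) :
    ∀ (l : List Int) (a : Int), 0 ≤ a → (∀ x ∈ l, ∀ (b : Int), 0 ≤ b → fA b x = fB b x) →
      l.foldl fA a = l.foldl fB a := by
  intro l
  induction l with
  | nil => intro a _ _; rfl
  | cons x xs ih =>
      intro a ha hall
      rw [List.foldl_cons, List.foldl_cons, hall x (by simp) a ha]
      exact ih (fB a x) (le_trans ha (hB a x)) (fun z hz b hb => hall z (by simp [hz]) b hb)

-- the column built by B, rewritten through concrete board cells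
theorem B_col_eq (board : List (List (List Int))) (width height x : Int)
    (hlen : height ≤ (board.length : Int))
    (hrow : ∀ row ∈ board.take height.toNat, width ≤ (row.length : Int))
    (hx0 : 0 ≤ x) (hxw : x < width) :
    (PySem.List.pyRange 0 height 1).map (fun y => pvColCell board x y)
      = (List.range height.toNat).map (fun j => (board.getD j []).getD x.toNat []) := by
  rw [PySem.List.pyRange_one]
  simp only [List.map_map]
  have hh : (height - 0).toNat = height.toNat := by omega
  rw [hh]
  apply List.map_congr_left
  intro j hj
  have hjh : j < height.toNat := List.mem_range.mp hj
  have hjb : j < board.length := by omega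
  have hrj : board[j] ∈ board.take height.toNat := by
    refine List.mem_iff_getElem.mpr ⟨j, by simp [List.length_take]; omega, ?_⟩
    simp [List.getElem_take]
  have hwr : width ≤ (board[j].length : Int) := hrow _ hrj
  have hxr : x.toNat < board[j].length := by omega
  simp only [Function.comp_apply, pvColCell]
  rw [zero_add, PySem.List.pyGetD_natCast]
  rw [List.getD_eq_getElem?_getD, List.getElem?_eq_getElem hjb]
  simp only [Option.getD_some]
  rw [PySem.List.pyGetD_eq_getElem _ _ hx0 (by omega)]
  simp [List.getD_eq_getElem?_getD, List.getElem?_eq_getElem hxr]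

-- B's per-column step is monotone in the accumulator
theorem B_step_mono (board : List (List (List Int))) (height : Int) (acc x : Int) :
    acc ≤ (match pvFindTop ((PySem.List.pyRange 0 height 1).map (fun y => pvColCell board x y)) with
           | none => acc
           | some t => max acc ((((PySem.List.pyRange 0 height 1).map
                (fun y => pvColCell board x y)).drop (t + 1)).countP (fun c => c == [0, 0, 0]) : Int)) := by
  cases h : pvFindTop ((PySem.List.pyRange 0 height 1).map (fun y => pvColCell board x y)) with
  | none => simp
  | some t => simp

-- ===== VERDICT (by name: the statement is the Claim_ definition above) =====

theorem calculate_hole_depth_spec : Claim_equal_calculate_hole_depth := by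
  intro board width height hdom hpre
  unfold Spec_calculate_hole_depth
  unfold calculate_hole_depth calculate_hole_depth_alt
  apply foldl_congr_nonneg _ _ (fun a x => B_step_mono board height a x) _ 0 (le_refl 0)
  intro x hx b hb
  obtain ⟨hx0, hxw⟩ := (PySem.List.mem_pyRange_one).mp hx
  have hbodyA : ((PySem.List.pyRange 0 height 1).foldl (fun (st : Int × Bool × Int) y =>
        let cell := PySem.List.pyGetD (PySem.List.pyGetD board y []) x []
        let depth := if st.2.1 && (cell == [0, 0, 0]) then st.1 + 1 else st.1
        let block_found := if cell != [0, 0, 0] then true else st.2.1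
        (depth, block_found, max st.2.2 depth)) (0, false, b)).2.2
      = (((PySem.List.pyRange 0 height 1).map (fun y => pvColCell board x y)).foldl
          pvStepA (0, false, b)).2.2 := by
    exact congrArg (fun p => p.2.2)
      (foldl_body_map (fun y => pvColCell board x y) pvStepA (PySem.List.pyRange 0 height 1) (0, false, b))
  rw [hbodyA]
  rw [B_step_eq _ b hb]
  rcases hpre with hw | hh | ⟨hlen, hrow⟩
  · omega
  · have hnil : PySem.List.pyRange 0 height 1 = [] := PySem.List.pyRange_one_eq_nil (by omega)
    simp only [hnil, List.map_nil, List.foldl_nil]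
    simp [pvHole, pvFindTop]
    omega
  · rw [B_col_eq board width height x hlen hrow hx0 hxw]
    exact pvStepA_run _ b hb
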